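-- pv_equiv track=rewrite | github.com/nishatanjumeva/AI-Course | Algorithm Implementation /minmax.py | minmax
-- ===== SOURCE A (Python) =====
-- def minmax(node, depth, isMax, scores):
--     """
--     node : current node index in scores list
--     depth : current depth of tree
--     isMax : True if MAX player, False if MIN player
--     scores: full list of leaf node scores (1-based indexing)
--     """
--     # Terminal condition: leaf node
--     if depth == 0:
--         return scores[node]
--
--     if isMax:
--         left = minmax(2*node, depth-1, False, scores)
--         right = minmax(2*node+1, depth-1, False, scores)
--         return max(left, right)
--     else:
--         left = minmax(2*node, depth-1, True, scores)
--         right = minmax(2*node+1, depth-1, True, scores)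
--         return min(left, right)
-- ===== SOURCE B (Python) =====
-- def minmax(node, depth, isMax, scores):
--     if depth == 0:
--         return scores[node]
--     span = 1 << depth
--     level = [scores[node * span + i] for i in range(span)]
--     p = isMax if depth % 2 == 1 else not isMax
--     for _ in range(depth):
--         op = max if p else min
--         level = [op(level[i], level[i + 1]) for i in range(0, len(level), 2)]
--         p = not p
--     return level[0]
-- ===== Notes on version B (the rewrite author's own statement) =====
-- stated objective: alternative
-- what changed: Replaces top-down recursion with alternating players by a bottom-up iterative pass: gather the 2**depth leaf scores once, then collapse adjacent pairs level by level with alternating min/max, parity arranged so the root combine matches isMax.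
import Mathlib
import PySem

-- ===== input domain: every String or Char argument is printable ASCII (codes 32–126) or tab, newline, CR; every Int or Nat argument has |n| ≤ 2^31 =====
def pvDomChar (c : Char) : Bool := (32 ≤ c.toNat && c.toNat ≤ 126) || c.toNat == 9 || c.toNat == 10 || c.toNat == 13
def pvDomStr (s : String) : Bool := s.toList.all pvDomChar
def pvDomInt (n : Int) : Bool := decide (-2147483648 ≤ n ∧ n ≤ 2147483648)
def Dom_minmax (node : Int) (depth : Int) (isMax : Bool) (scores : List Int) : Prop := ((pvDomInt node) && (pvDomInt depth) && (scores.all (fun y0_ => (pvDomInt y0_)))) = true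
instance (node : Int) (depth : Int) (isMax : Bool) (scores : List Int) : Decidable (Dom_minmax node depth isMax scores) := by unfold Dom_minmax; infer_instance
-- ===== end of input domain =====

-- B replaces A's top-down recursion by a bottom-up level-by-level collapse of the leaf slice
-- with alternating min/max (objective: alternative decomposition, same cost).

-- scores[idx] with Python indexing; Pre_ guarantees the index is in range, so getD 0 is never hit inside Pre_.
def pyAt (scores : List Int) (idx : Int) : Int := (PySem.List.pyGet? scores idx).getD 0

-- ===== PORT A =====
def minmaxGo (scores : List Int) : Nat → Int → Bool → Int
  | 0, node, _ => pyAt scores node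
  | d+1, node, isMax =>
    if isMax then
      max (minmaxGo scores d (2*node) false) (minmaxGo scores d (2*node+1) false)
    else
      min (minmaxGo scores d (2*node) true) (minmaxGo scores d (2*node+1) true)

def minmax (node : Int) (depth : Int) (isMax : Bool) (scores : List Int) : Int :=
  minmaxGo scores depth.toNat node isMax

-- ===== PORT B =====
-- one comprehension step: combine adjacent pairs with max (p) or min (not p)
def pairUp (p : Bool) : List Int → List Int
  | a :: b :: rest => (if p then max a b else min a b) :: pairUp p rest
  | l => l

-- `for _ in range(depth): level = pairUp p level; p = not p`
def collapseLoop : Nat → Bool → List Int → List Int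
  | 0, _, lvl => lvl
  | f+1, p, lvl => collapseLoop f (!p) (pairUp p lvl)

-- `[scores[node*span + i] for i in range(span)]`
def leaves (scores : List Int) (node : Int) (span : Nat) : List Int :=
  (List.range span).map (fun (i : Nat) => pyAt scores (node * (span : Int) + (i : Int)))

def minmax_alt (node : Int) (depth : Int) (isMax : Bool) (scores : List Int) : Int :=
  if depth = 0 then pyAt scores node
  else
    let d := depth.toNat
    let level := leaves scores node (2 ^ d)
    let p := if depth % 2 = 1 then isMax else !isMax
    (PySem.List.pyGet? (collapseLoop d p level) 0).getD 0

-- ===== PRECONDITION & SPEC =====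
-- Pre_: exactly the inputs where Python A returns: depth ≥ 0 (negative depth never reaches the
-- base case: RecursionError) and every leaf index node*2^depth + i, 0 ≤ i < 2^depth, is a valid
-- Python index into scores (else IndexError); since the indices are consecutive this is the
-- two endpoint bounds. The conjunct depth ≤ scores.length is IMPLIED by the span bounds
-- (2^depth ≤ scores.length follows from them, and depth < 2^depth); it is placed first only so
-- the check is cheap to evaluate and never computes 2^depth for huge depth. Written as a Bool
-- guard so evaluation short-circuits.
def preCheck (node : Int) (depth : Int) (scores : List Int) : Bool :=
  if 0 ≤ depth ∧ depth ≤ (scores.length : Int) then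
    let span : Int := 2 ^ depth.toNat
    decide (-(scores.length : Int) ≤ node * span ∧ node * span + span ≤ (scores.length : Int))
  else false

def Pre_minmax (node : Int) (depth : Int) (isMax : Bool) (scores : List Int) : Prop :=
  preCheck node depth scores = true
instance (node : Int) (depth : Int) (isMax : Bool) (scores : List Int) : Decidable (Pre_minmax node depth isMax scores) := by unfold Pre_minmax; infer_instance

def pvWitness_minmax : Int × Int × Bool × List Int := (0, 1, true, [3, 5])

def Spec_minmax (node : Int) (depth : Int) (isMax : Bool) (scores : List Int) (out : Int) : Prop := out = minmax_alt node depth isMax scores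
instance (node : Int) (depth : Int) (isMax : Bool) (scores : List Int) (out : Int) : Decidable (Spec_minmax node depth isMax scores out) := by unfold Spec_minmax; infer_instance

-- ===== CLAIM (what is proved, stated in full; the proofs are below) =====
def Claim_equal_minmax : Prop := ∀ (node : Int) (depth : Int) (isMax : Bool) (scores : List Int), Dom_minmax node depth isMax scores → Pre_minmax node depth isMax scores → Spec_minmax node depth isMax scores (minmax node depth isMax scores)

-- ===== LEMMAS AND PROOFS =====

-- parity of the starting player p, seen from q = the player at the level d combines above
def startP (d : Nat) (q : Bool) : Bool := if d % 2 = 1 then q else !q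

theorem pairUp_append : ∀ (xs ys : List Int) (p : Bool), xs.length % 2 = 0 →
    pairUp p (xs ++ ys) = pairUp p xs ++ pairUp p ys
  | [], ys, p, _ => by simp [pairUp]
  | [a], ys, p, h => by simp at h
  | a :: b :: rest, ys, p, h => by
    simp only [List.cons_append, pairUp, List.length_cons] at *
    rw [pairUp_append rest ys p (by omega)]

theorem pairUp_length : ∀ (xs : List Int) (p : Bool), xs.length % 2 = 0 →
    (pairUp p xs).length = xs.length / 2
  | [], p, _ => by simp [pairUp]
  | [a], p, h => by simp at h
  | a :: b :: rest, p, h => by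
    simp only [pairUp, List.length_cons] at *
    rw [pairUp_length rest p (by omega)]; omega

theorem collapseLoop_append (d : Nat) : ∀ (xs ys : List Int) (p : Bool), xs.length = 2 ^ d →
    collapseLoop d p (xs ++ ys) = collapseLoop d p xs ++ collapseLoop d p ys := by
  induction d with
  | zero => intro xs ys p _; rfl
  | succ d ih =>
    intro xs ys p h
    have hev : xs.length % 2 = 0 := by rw [h, pow_succ]; omega
    simp only [collapseLoop]
    rw [pairUp_append xs ys p hev, ih _ _ _ (by rw [pairUp_length xs p hev, h, pow_succ]; omega)]

theorem collapseLoop_succ_last (d : Nat) : ∀ (p : Bool) (lvl : List Int),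
    collapseLoop (d+1) p lvl = pairUp (if d % 2 = 0 then p else !p) (collapseLoop d p lvl) := by
  induction d with
  | zero => intro p lvl; simp [collapseLoop]
  | succ d ih =>
    intro p lvl
    show collapseLoop (d+1) (!p) (pairUp p lvl) = _
    rw [ih (!p) (pairUp p lvl)]
    have : collapseLoop (d+1) p lvl = collapseLoop d (!p) (pairUp p lvl) := rfl
    rw [this]
    rcases Nat.mod_two_eq_zero_or_one d with h | h <;> simp [h, Nat.succ_mod_two_eq_zero_iff]

theorem leaves_length (scores : List Int) (node : Int) (span : Nat) :
    (leaves scores node span).length = span := by simp [leaves]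

theorem leaves_split (scores : List Int) (node : Int) (d : Nat) :
    leaves scores node (2 ^ (d+1)) =
      leaves scores (2*node) (2 ^ d) ++ leaves scores (2*node+1) (2 ^ d) := by
  unfold leaves
  rw [show 2 ^ (d+1) = 2 ^ d + 2 ^ d by ring, List.range_add, List.map_append, List.map_map]
  congr 1
  · apply List.map_congr_left; intro i _; congr 1; push_cast; ring
  · apply List.map_congr_left; intro i _
    simp only [Function.comp]; congr 1; push_cast; ring

theorem collapse_leaves (scores : List Int) : ∀ (d : Nat) (node : Int) (q : Bool),
    collapseLoop d (startP d q) (leaves scores node (2 ^ d)) = [minmaxGo scores d node q] := by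
  intro d
  induction d with
  | zero =>
    intro node q
    simp [collapseLoop, leaves, minmaxGo]
  | succ d ih =>
    intro node q
    have hp : startP (d+1) q = startP d (!q) := by
      unfold startP
      rcases Nat.mod_two_eq_zero_or_one d with h | h <;>
        simp [h, Nat.succ_mod_two_eq_one_iff]
    rw [collapseLoop_succ_last, leaves_split,
      collapseLoop_append d _ _ _ (leaves_length scores (2*node) (2 ^ d)), hp,
      ih (2*node) (!q), ih (2*node+1) (!q)]
    have hlast : (if d % 2 = 0 then startP d (!q) else !(startP d (!q))) = q := by
      unfold startP; rcases Nat.mod_two_eq_zero_or_one d with h | h <;> simp [h]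
    rw [hlast]
    cases q <;> simp [pairUp, minmaxGo]

-- ===== VERDICT (by name: the statement is the Claim_ definition above) =====
theorem minmax_spec : Claim_equal_minmax := by
  intro node depth isMax scores _ hpre
  unfold Spec_minmax minmax minmax_alt
  have h0 : 0 ≤ depth := by
    unfold Pre_minmax preCheck at hpre
    split at hpre
    · omega
    · exact absurd hpre (by simp)
  by_cases hz : depth = 0
  · subst hz; simp [minmaxGo]
  · rw [if_neg hz]
    have hd : (depth.toNat : Int) = depth := Int.toNat_of_nonneg h0
    have hpar : (if depth % 2 = 1 then isMax else !isMax) = startP depth.toNat isMax := by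
      unfold startP
      have : depth % 2 = 1 ↔ depth.toNat % 2 = 1 := by omega
      by_cases h : depth % 2 = 1
      · rw [if_pos h, if_pos (this.mp h)]
      · rw [if_neg h, if_neg (fun hc => h (this.mpr hc))]
    simp only []
    rw [hpar, collapse_leaves scores depth.toNat node isMax]
    simp [PySem.List.pyGet?, PySem.List.pyIdx?]
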